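-- pv_equiv track=rewrite | github.com/DCHuTJU/blockchain2021 | graduation/2018级/fuzhao/code/code/storage/dfhmt.py | v_node
-- ===== SOURCE A (Python) =====
-- def v_node(i, n):#返回验证路径
-- 	node = [] #节点到根节点路径
-- 	bro_node = [] #兄弟节点，即验证路径
-- 	l = [0]
-- 	index = 0
-- 	#每层的节点数
-- 	for j in range(1, n - 1):
-- 		l.append(2 ** (n - j) + l[j - 1])
--
-- 	for j in range(0, n - 1):
-- 		index = l[j] + int(i / (2 ** j))
-- 		node.append(index)
--
-- 	for j in node:
-- 		if j % 2 == 0: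
-- 			bro_node.append(j + 1)
-- 		else:
-- 			bro_node.append(j - 1)
-- 	return bro_node
-- ===== SOURCE B (Python) =====
-- def v_node(i, n):
--     # Closed form: level offset l[j] = 2**n - 2**(n-j); sibling of x is x+1-2*(x%2).
--     def sib(x):
--         return x + 1 - 2 * (x % 2)
--     return [sib(2 ** n - 2 ** (n - j) + int(i / (2 ** j))) for j in range(n - 1)]
-- ===== Notes on version B (the rewrite author's own statement) =====
-- stated objective: simpler
-- what changed: Replaces the prefix-sum array l and the three sequential loops (build l, build node, build bro_node) with a single comprehension using the closed form 2**n - 2**(n-j) for l[j] and the arithmetic sibling formula x+1-2*(x%2), so no intermediate lists are built.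
import Mathlib
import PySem

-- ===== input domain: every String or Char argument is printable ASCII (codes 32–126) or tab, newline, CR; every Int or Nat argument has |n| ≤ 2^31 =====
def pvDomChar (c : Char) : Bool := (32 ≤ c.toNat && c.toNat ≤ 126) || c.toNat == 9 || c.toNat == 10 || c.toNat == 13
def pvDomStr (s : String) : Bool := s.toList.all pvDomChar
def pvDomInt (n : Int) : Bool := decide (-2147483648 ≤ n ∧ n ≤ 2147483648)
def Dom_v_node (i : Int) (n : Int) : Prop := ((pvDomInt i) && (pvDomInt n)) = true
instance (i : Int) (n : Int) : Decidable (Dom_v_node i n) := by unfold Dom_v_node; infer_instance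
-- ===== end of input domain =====

-- B replaces A's prefix-sum array l and its three sequential loops with one pass using the
-- closed form l[j] = 2^n - 2^(n-j) and the sibling formula x+1-2*(x%2); objective: simpler.

-- ===== PORT A =====
-- int(i/(2**j)) is Python float true-division then truncation toward zero; for |i| ≤ 2^31 the
-- dyadic division i/2^j is exact in float until underflow, where both sides give 0, so it is
-- exactly truncating integer division: ported as Int.tdiv. On every executed loop iteration
-- the exponents n-j are ≥ 2, so the .toNat in 2^(n-j) is exact there. The l[j-1] and l[j]
-- subscripts are always in range, so pyGetD with default 0 is exact.
def v_node (i : Int) (n : Int) : List Int :=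
  let l : List Int := (PySem.List.pyRange 1 (n-1) 1).foldl
    (fun l j => l ++ [(2:ℤ) ^ (n - j).toNat + PySem.List.pyGetD l (j-1) 0]) [0]
  let node : List Int := (PySem.List.pyRange 0 (n-1) 1).foldl
    (fun acc j => acc ++ [PySem.List.pyGetD l j 0 + Int.tdiv i ((2:ℤ) ^ j.toNat)]) []
  node.foldl (fun acc j => acc ++ [if PySem.Int.mod j 2 = 0 then j + 1 else j - 1]) []

-- ===== PORT B =====
def pvSib (x : Int) : Int := x + 1 - 2 * PySem.Int.mod x 2

def v_node_alt (i : Int) (n : Int) : List Int :=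
  (PySem.List.pyRange 0 (n-1) 1).map
    (fun j => pvSib ((2:ℤ) ^ n.toNat - (2:ℤ) ^ (n - j).toNat + Int.tdiv i ((2:ℤ) ^ j.toNat)))

-- ===== PRECONDITION & SPEC =====
def Spec_v_node (i : Int) (n : Int) (out : List Int) : Prop := out = v_node_alt i n
instance (i : Int) (n : Int) (out : List Int) : Decidable (Spec_v_node i n out) := by unfold Spec_v_node; infer_instance

-- ===== CLAIM (what is proved, stated in full; the proofs are below) =====
def Claim_equal_v_node : Prop := ∀ (i : Int) (n : Int), Dom_v_node i n → Spec_v_node i n (v_node i n)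

-- ===== LEMMAS AND PROOFS =====

-- invariant of A's first loop: after processing range(a, n-1) starting from the closed-form
-- prefix of length a, the whole array l has the closed form 2^n - 2^(n-j)
lemma pv_l_aux (n : Int) (k : Nat) :
    ∀ (a : Int), 1 ≤ a → a + k = n - 1 →
    (PySem.List.pyRange a (n-1) 1).foldl
        (fun l j => l ++ [(2:ℤ) ^ (n - j).toNat + PySem.List.pyGetD l (j-1) 0])
        ((PySem.List.pyRange 0 a 1).map (fun j => (2:ℤ) ^ n.toNat - (2:ℤ) ^ (n - j).toNat))
    = (PySem.List.pyRange 0 (n-1) 1).map (fun j => (2:ℤ) ^ n.toNat - (2:ℤ) ^ (n - j).toNat) := by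
  induction k with
  | zero =>
    intro a h1 h2
    have ha : a = n - 1 := by omega
    subst ha
    rw [PySem.List.pyRange_one_eq_nil (le_refl (n-1)), List.foldl_nil]
  | succ k ih =>
    intro a h1 h2
    rw [PySem.List.pyRange_one_cons (by omega : a < n - 1)]
    simp only [List.foldl_cons]
    have hget : PySem.List.pyGetD
        ((PySem.List.pyRange 0 a 1).map (fun j => (2:ℤ) ^ n.toNat - (2:ℤ) ^ (n - j).toNat)) (a-1) 0
        = (2:ℤ) ^ n.toNat - (2:ℤ) ^ (n - (a-1)).toNat :=
      PySem.List.pyGetD_map_pyRange_of_nonneg _ a (a-1) 0 (by omega) (by omega)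
    rw [hget]
    have hexp : (n - (a-1)).toNat = (n - a).toNat + 1 := by omega
    have harith : ((2 ^ (n - a).toNat + (2 ^ n.toNat - 2 ^ (n - (a-1)).toNat) : ℤ))
        = (2 ^ n.toNat - 2 ^ (n - a).toNat : ℤ) := by
      rw [hexp, pow_succ]; ring
    rw [harith]
    have hsnoc : (PySem.List.pyRange 0 a 1).map (fun j => (2:ℤ) ^ n.toNat - (2:ℤ) ^ (n - j).toNat)
        ++ [(2:ℤ) ^ n.toNat - (2:ℤ) ^ (n - a).toNat]
        = (PySem.List.pyRange 0 (a+1) 1).map (fun j => (2:ℤ) ^ n.toNat - (2:ℤ) ^ (n - j).toNat) := by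
      rw [PySem.List.pyRange_one_succ_right (by omega : (0:Int) ≤ a)]; simp
    rw [hsnoc]
    exact ih (a+1) (by omega) (by omega)

-- closed form of A's whole prefix-sum array l (for n ≥ 2; below that the loops are empty)
lemma pv_l_closed (n : Int) (hn : 2 ≤ n) :
    (PySem.List.pyRange 1 (n-1) 1).foldl
      (fun l j => l ++ [(2:ℤ) ^ (n - j).toNat + PySem.List.pyGetD l (j-1) 0]) [0]
    = (PySem.List.pyRange 0 (n-1) 1).map (fun j => (2:ℤ) ^ n.toNat - (2:ℤ) ^ (n - j).toNat) := by
  have h0 : (PySem.List.pyRange 0 1 1).map (fun j => (2:ℤ) ^ n.toNat - (2:ℤ) ^ (n - j).toNat)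
      = [(0:ℤ)] := by
    rw [show PySem.List.pyRange 0 1 1 = [(0:ℤ)] from by decide]
    simp
  have := pv_l_aux n (n-2).toNat 1 (by omega) (by omega)
  rw [h0] at this
  exact this

-- A's branch and B's arithmetic compute the same sibling
lemma pv_sib_eq (x : Int) :
    (if PySem.Int.mod x 2 = 0 then x + 1 else x - 1) = pvSib x := by
  unfold pvSib
  rcases PySem.Int.mod_two_eq x with h | h
  · rw [if_pos h, h]; ring
  · rw [if_neg (by rw [h]; norm_num), h]; ring

-- ===== VERDICT (by name: the statement is the Claim_ definition above) =====
theorem v_node_spec : Claim_equal_v_node := by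
  intro i n _
  unfold Spec_v_node v_node v_node_alt
  by_cases hn : n ≤ 1
  · rw [PySem.List.pyRange_one_eq_nil (by omega : n - 1 ≤ 0),
        PySem.List.pyRange_one_eq_nil (by omega : n - 1 ≤ 1)]
    simp
  · have hl := pv_l_closed n (by omega)
    simp only [hl, PySem.List.foldl_append_singleton_eq_map, List.nil_append, List.map_map]
    refine List.map_congr_left ?_
    intro j hj
    have hmem := (PySem.List.mem_pyRange_one).mp hj
    have hget := PySem.List.pyGetD_map_pyRange_of_nonneg
      (fun j => (2:ℤ) ^ n.toNat - (2:ℤ) ^ (n - j).toNat) (n-1) j 0 hmem.1 hmem.2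
    simp only [Function.comp, hget, pv_sib_eq]
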